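-- pv_equiv track=rewrite | github.com/amperser/proselint | proselint/optimized_checks.py | find_line_col
-- ===== SOURCE A (Python) =====
-- from typing import Iterator, NamedTuple, Optional, Pattern, Dict, Tuple
--
-- def find_line_col(position: int, line_bounds: Tuple[int, ...]) -> Tuple[int, int]:
--     """Binary search for line and column."""
--     if not line_bounds or position < 0:
--         return (1, 1)
--
--     # Binary search for the line
--     left, right = 0, len(line_bounds) - 1
--     while left < right:
--         mid = (left + right + 1) // 2
--         if line_bounds[mid] <= position:
--             left = mid
--         else:
--             right = mid - 1
--
--     line = left + 1
--     col = position - line_bounds[left] + 1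
--     return (line, col)
-- ===== SOURCE B (Python) =====
-- def find_line_col(position, line_bounds):
--     """Single linear scan: keep the last index whose bound is <= position."""
--     if not line_bounds or position < 0:
--         return (1, 1)
--     idx = 0
--     i = 0
--     for b in line_bounds:
--         if b <= position:
--             idx = i
--         i += 1
--     return (idx + 1, position - line_bounds[idx] + 1)
-- ===== Notes on version B (the rewrite author's own statement) =====
-- stated objective: simpler
-- what changed: Replaces the rightmost binary search over line bounds with a single left-to-right scan that remembers the last index whose bound is <= position; Pre_ keeps exactly the inputs where A's binary search is meaningful (the bounds <= position form a prefix, as for real sorted line offsets).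
-- outside the precondition, e.g. on find_line_col(3, (0, 5, 3)): A returns (1, 4), B returns (3, 1)
import Mathlib
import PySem

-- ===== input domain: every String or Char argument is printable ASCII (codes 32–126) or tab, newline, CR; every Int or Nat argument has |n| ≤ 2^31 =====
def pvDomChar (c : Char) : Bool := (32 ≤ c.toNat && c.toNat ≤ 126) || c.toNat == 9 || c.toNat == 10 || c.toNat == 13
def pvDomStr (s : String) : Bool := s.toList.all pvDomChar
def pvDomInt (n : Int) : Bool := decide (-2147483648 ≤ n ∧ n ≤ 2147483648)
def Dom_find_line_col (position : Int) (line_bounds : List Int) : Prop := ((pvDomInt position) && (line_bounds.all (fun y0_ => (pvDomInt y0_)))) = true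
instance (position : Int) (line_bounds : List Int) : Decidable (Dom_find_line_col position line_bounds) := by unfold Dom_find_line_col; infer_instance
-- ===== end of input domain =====

-- B replaces A's rightmost binary search with one linear scan remembering the
-- last index whose bound is ≤ position (objective: simpler).

-- ===== PORT A =====
-- the 'while left < right' loop of A; terminates because right - left shrinks
def pvBsLoop (position : Int) (line_bounds : List Int) (left right : Int) : Int :=
  if h : left < right then
    let mid := PySem.Int.floordiv (left + right + 1) 2
    if (PySem.List.pyGet? line_bounds mid).getD 0 ≤ position then
      pvBsLoop position line_bounds mid right
    else
      pvBsLoop position line_bounds left (mid - 1)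
  else left
termination_by (right - left).toNat
decreasing_by
  · have hb := PySem.Int.floordiv_two_mid_bounds (lo := left + 1) (hi := right) (by omega)
    have : left + 1 + right = left + right + 1 := by ring
    rw [this] at hb
    omega
  · have hb := PySem.Int.floordiv_two_mid_bounds (lo := left + 1) (hi := right) (by omega)
    have : left + 1 + right = left + right + 1 := by ring
    rw [this] at hb
    omega

def find_line_col (position : Int) (line_bounds : List Int) : Int × Int :=
  if line_bounds = [] ∨ position < 0 then (1, 1)
  else
    let left := pvBsLoop position line_bounds 0 ((line_bounds.length : Int) - 1)
    (left + 1, position - (PySem.List.pyGet? line_bounds left).getD 0 + 1)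

-- ===== PORT B =====
-- the 'for b in line_bounds' loop of B, carrying the counter i and the accumulator idx
def pvScanIdx (position : Int) : List Int → Int → Int → Int
  | [], _, idx => idx
  | b :: rest, i, idx => pvScanIdx position rest (i + 1) (if b ≤ position then i else idx)

def find_line_col_alt (position : Int) (line_bounds : List Int) : Int × Int :=
  if line_bounds = [] ∨ position < 0 then (1, 1)
  else
    let idx := pvScanIdx position line_bounds 0 0
    (idx + 1, position - (PySem.List.pyGet? line_bounds idx).getD 0 + 1)

-- ===== PRECONDITION & SPEC =====
-- Pre_ excludes (for position ≥ 0) lists in which the elements ≤ position do not form a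
-- prefix: A's binary search assumes sorted data (line_bounds are nondecreasing line start
-- offsets), and on such lists its value is an accident of its probing order that no
-- caller could rely on.
def Pre_find_line_col (position : Int) (line_bounds : List Int) : Prop :=
  position < 0 ∨ List.Pairwise (fun a b => b ≤ position → a ≤ position) line_bounds
instance (position : Int) (line_bounds : List Int) : Decidable (Pre_find_line_col position line_bounds) := by unfold Pre_find_line_col; infer_instance

def pvWitness_find_line_col : Int × List Int := (5, [0, 3, 7])

def Spec_find_line_col (position : Int) (line_bounds : List Int) (out : Int × Int) : Prop := out = find_line_col_alt position line_bounds
instance (position : Int) (line_bounds : List Int) (out : Int × Int) : Decidable (Spec_find_line_col position line_bounds out) := by unfold Spec_find_line_col; infer_instance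

-- ===== CLAIM (what is proved, stated in full; the proofs are below) =====
def Claim_equal_find_line_col : Prop := ∀ (position : Int) (line_bounds : List Int), Dom_find_line_col position line_bounds → Pre_find_line_col position line_bounds → Spec_find_line_col position line_bounds (find_line_col position line_bounds)

-- ===== LEMMAS AND PROOFS =====

-- K: in a sorted list, the indices with element ≤ position are exactly the prefix
-- of length c = |takeWhile (· ≤ position)|.
theorem pv_sorted_prefix (position : Int) (lb : List Int)
    (hs : List.Pairwise (fun a b => b ≤ position → a ≤ position) lb) :
    ∀ i (h : i < lb.length),
      (lb[i] ≤ position ↔ i < (lb.takeWhile (fun b => decide (b ≤ position))).length) := by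
  induction lb with
  | nil => intro i h; simp at h
  | cons b rest ih =>
    rcases List.pairwise_cons.mp hs with ⟨hb, hrest⟩
    intro i h
    by_cases hble : b ≤ position
    · have : (b :: rest).takeWhile (fun b => decide (b ≤ position))
          = b :: rest.takeWhile (fun b => decide (b ≤ position)) := by
        simp [List.takeWhile_cons, hble]
      rw [this]
      cases i with
      | zero => simpa using hble
      | succ j =>
        have hj : j < rest.length := by simpa using h
        have := ih hrest j hj
        simpa [Nat.succ_lt_succ_iff] using this
    · have : (b :: rest).takeWhile (fun b => decide (b ≤ position)) = [] := by
        simp [List.takeWhile_cons, hble]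
      rw [this]
      cases i with
      | zero => simpa using hble
      | succ j =>
        have hj : j < rest.length := by simpa using h
        simp only [List.getElem_cons_succ, List.length_nil]
        constructor
        · intro hle
          exact absurd (hb _ (rest.getElem_mem hj) hle) hble
        · omega

-- the linear scan returns the last index of the ≤-prefix (or the accumulator if empty)
theorem pv_scan_eq (position : Int) :
    ∀ (ys : List Int) (c : Nat) (i idx : Int),
      c ≤ ys.length →
      (∀ j (h : j < ys.length), (ys[j] ≤ position ↔ j < c)) →
      pvScanIdx position ys i idx = if c = 0 then idx else i + (c : Int) - 1 := by
  intro ys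
  induction ys with
  | nil =>
    intro c i idx hc _
    have : c = 0 := by simpa using hc
    simp [pvScanIdx, this]
  | cons b rest ih =>
    intro c i idx hc hK
    have hb0 := hK 0 (by simp)
    simp only [List.getElem_cons_zero] at hb0
    by_cases hble : b ≤ position
    · have hcpos : 0 < c := hb0.mp hble
      have hrest : ∀ j (h : j < rest.length), (rest[j] ≤ position ↔ j < c - 1) := by
        intro j hj
        have := hK (j + 1) (by simpa using Nat.succ_lt_succ hj)
        simp only [List.getElem_cons_succ] at this
        rw [this]; omega
      have := ih (c - 1) (i + 1) i (by simp at hc; omega) hrest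
      simp only [pvScanIdx, hble, if_pos]
      rw [this]
      by_cases h1 : c = 1
      · simp [h1]
      · have : ¬ (c - 1 = 0) := by omega
        simp only [this, if_neg, hcpos.ne', if_neg]
        push_cast [Nat.cast_sub (by omega : 1 ≤ c)]
        ring
    · have hc0 : c = 0 := by
        by_contra h
        exact hble (hb0.mpr (by omega))
      subst hc0
      have hrest : ∀ j (h : j < rest.length), (rest[j] ≤ position ↔ j < 0) := by
        intro j hj
        have := hK (j + 1) (by simpa using Nat.succ_lt_succ hj)
        simp only [List.getElem_cons_succ] at this
        rw [this]; omega
      have := ih 0 (i + 1) idx (by omega) hrest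
      simp only [pvScanIdx, hble, if_neg, if_false]
      simpa using this

-- the binary search keeps the target index a inside [left, right]
theorem pv_bs_eq (position : Int) (lb : List Int) (c : Nat)
    (hcl : c ≤ lb.length)
    (hK : ∀ j (h : j < lb.length), (lb[j] ≤ position ↔ j < c)) :
    ∀ (n : Nat) (left right : Int), (right - left).toNat ≤ n →
      0 ≤ left → left ≤ (if c = 0 then 0 else (c : Int) - 1) →
      (if c = 0 then 0 else (c : Int) - 1) ≤ right → right < lb.length →
      pvBsLoop position lb left right = (if c = 0 then 0 else (c : Int) - 1) := by
  intro n
  induction n with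
  | zero =>
    intro left right hn h0 hla har hrn
    have : ¬ left < right := by omega
    rw [pvBsLoop, dif_neg this]
    split_ifs at hla har <;> omega
  | succ m ih =>
    intro left right hn h0 hla har hrn
    by_cases hlr : left < right
    · have hb := PySem.Int.floordiv_two_mid_bounds (lo := left + 1) (hi := right) (by omega)
      have heq : left + 1 + right = left + right + 1 := by ring
      rw [heq] at hb
      set mid := PySem.Int.floordiv (left + right + 1) 2 with hmid
      have hmid0 : 0 ≤ mid := by omega
      have hmidn : mid.toNat < lb.length := by omega
      have hget : (PySem.List.pyGet? lb mid).getD 0 = lb[mid.toNat] := by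
        rw [PySem.List.pyGet?_of_nonneg (xs := lb) hmid0, List.getElem?_eq_getElem hmidn]
        rfl
      have htest : ((PySem.List.pyGet? lb mid).getD 0 ≤ position) ↔ (mid.toNat < c) := by
        rw [hget]; exact hK mid.toNat hmidn
      rw [pvBsLoop, dif_pos hlr]
      simp only [← hmid]
      by_cases hcase : (PySem.List.pyGet? lb mid).getD 0 ≤ position
      · -- mid ≤ a : recurse on [mid, right]
        have hmida : mid ≤ (if c = 0 then 0 else (c : Int) - 1) := by
          have := htest.mp hcase
          split_ifs with h <;> omega
        rw [if_pos hcase]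
        exact ih mid right (by omega) (by omega) hmida har hrn
      · -- a < mid : recurse on [left, mid-1]
        have hamid : (if c = 0 then 0 else (c : Int) - 1) ≤ mid - 1 := by
          have := htest.not.mp hcase
          split_ifs with h <;> omega
        rw [if_neg hcase]
        exact ih left (mid - 1) (by omega) h0 hla hamid (by omega)
    · have : ¬ left < right := hlr
      rw [pvBsLoop, dif_neg this]
      split_ifs at hla har <;> omega

-- ===== VERDICT (by name: the statement is the Claim_ definition above) =====
theorem find_line_col_spec : Claim_equal_find_line_col := by
  intro position lb _ hpre
  unfold Spec_find_line_col find_line_col find_line_col_alt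
  by_cases hdeg : lb = [] ∨ position < 0
  · rw [if_pos hdeg, if_pos hdeg]
  · rw [if_neg hdeg, if_neg hdeg]
    push_neg at hdeg
    obtain ⟨hne, hpos⟩ := hdeg
    have hpre : List.Pairwise (fun a b => b ≤ position → a ≤ position) lb := by
      rcases hpre with h | h
      · omega
      · exact h
    set c := (lb.takeWhile (fun b => decide (b ≤ position))).length with hc
    have hcl : c ≤ lb.length := (List.takeWhile_prefix _).length_le
    have hK := pv_sorted_prefix position lb hpre
    have hlen : 0 < lb.length := List.length_pos_iff.mpr hne
    have hbs := pv_bs_eq position lb c hcl hK (right := (lb.length : Int) - 1)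
      (left := 0) ((lb.length : Int) - 1 - 0).toNat (le_refl _)
      (le_refl 0) (by split_ifs with h <;> omega) (by split_ifs with h <;> omega)
      (by omega)
    have hsc := pv_scan_eq position lb c 0 0 hcl hK
    rw [hbs, hsc]
    split_ifs <;> simp
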